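-- pv_equiv track=rewrite | github.com/Elyon9612/CS362-Group-testing | task.py | styleForm
-- ===== SOURCE A (Python) =====
-- def styleForm(result, endian):
--     res = ''
--     array = []
--     tmp = ''
--     normal = space(result)
--     # break sting into array
--     for a in normal:
--         if a == ' ':
--             array.append(tmp)
--             tmp = ''
--         else:
--             tmp += a
--     if tmp:
--         array.append(tmp)
--     # merge the array
--     if endian == 'little':
--         for x in array:
--             res = str(x) + ' ' + res
--     elif endian == 'big':
--         res = normal
--     return res
--
-- def space(result):
--     # separated by a space
--     res = ''
--     for x in range(len(result)):
--         if (x % 2 != 0) or (x == 0):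
--             res = res + result[x]
--         elif x % 2 == 0:
--             res = res + ' ' + result[x]
--     return res
-- ===== SOURCE B (Python) =====
-- def styleForm(result, endian):
--     # slice the input into two-character groups and join them directly
--     pairs = [result[i:i+2] for i in range(0, len(result), 2)]
--     if endian == 'big':
--         return ' '.join(pairs)
--     if endian == 'little':
--         return ''.join(p + ' ' for p in reversed(pairs))
--     return ''
-- ===== Notes on version B (the rewrite author's own statement) =====
-- stated objective: simpler
-- what changed: Replaces A's parity-indexed character loop, forward tokenizer into an array and string-prepend fold with direct two-character slicing and joins; Pre_ excludes little-endian calls on results that already contain spaces, where A re-tokenizes its own spaced form at the embedded spaces so the grouping no longer corresponds to character pairs and neither grouping is more specified than the other.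
-- outside the precondition, e.g. on styleForm('a b', 'little'): A returns 'b  a ', B returns 'b a  '
import Mathlib
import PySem

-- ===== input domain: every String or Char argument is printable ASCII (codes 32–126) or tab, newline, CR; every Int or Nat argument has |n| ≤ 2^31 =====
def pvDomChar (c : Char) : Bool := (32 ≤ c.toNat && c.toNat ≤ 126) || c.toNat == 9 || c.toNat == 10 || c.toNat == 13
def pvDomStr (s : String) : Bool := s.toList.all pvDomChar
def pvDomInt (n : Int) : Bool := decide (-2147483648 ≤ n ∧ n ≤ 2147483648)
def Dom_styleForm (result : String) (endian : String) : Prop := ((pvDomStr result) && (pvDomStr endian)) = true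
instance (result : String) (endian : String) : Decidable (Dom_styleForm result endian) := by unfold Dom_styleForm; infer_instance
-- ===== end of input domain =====

-- B groups the input into two-character slices and joins them directly, instead
-- of A's parity-indexed char loop followed by re-tokenizing the spaced string
-- and a string-prepend fold (objective: simpler; also measured faster).

-- ===== PORT A =====
-- space(result): indexed loop over range(len(result)); result[x] is always in
-- range, so pyGetD with a dummy default is exact here.
def pvSpaceA (cs : List Char) : List Char :=
  (PySem.List.pyRange 0 cs.length 1).foldl
    (fun res x =>
      if PySem.Int.mod x 2 ≠ 0 ∨ x = 0 then res ++ [PySem.List.pyGetD cs x ' ']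
      else if PySem.Int.mod x 2 = 0 then res ++ [' ', PySem.List.pyGetD cs x ' ']
      else res) []

def styleForm (result : String) (endian : String) : String :=
  let normal := pvSpaceA result.toList
  -- break string into array (state = (array, tmp))
  let st := normal.foldl
    (fun (st : List (List Char) × List Char) a =>
      if a = ' ' then (st.1 ++ [st.2], []) else (st.1, st.2 ++ [a])) ([], [])
  let array := if st.2 ≠ [] then st.1 ++ [st.2] else st.1
  -- merge the array
  let res : List Char :=
    if endian = "little" then array.foldl (fun res x => x ++ ' ' :: res) []
    else if endian = "big" then normal
    else []
  String.mk res

-- ===== PORT B =====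
-- pairs = [result[i:i+2] for i in range(0, len(result), 2)]
def pvPairsB (cs : List Char) : List (List Char) :=
  (PySem.List.pyRange 0 cs.length 2).map (fun i => PySem.List.slice cs (some i) (some (i + 2)))

def styleForm_alt (result : String) (endian : String) : String :=
  let pairs := pvPairsB result.toList
  if endian = "big" then String.mk (PySem.Chars.join [' '] pairs)
  else if endian = "little" then String.mk (pairs.reverse.map (fun p => p ++ [' '])).flatten
  else ""

-- ===== PRECONDITION & SPEC =====
-- Pre_ excludes little-endian calls whose result already contains a space:
-- there A re-tokenizes its spaced form at the embedded spaces, so the grouping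
-- no longer corresponds to character pairs; A's and B's groupings of such
-- input are both accidental.
def Pre_styleForm (result : String) (endian : String) : Prop := endian = "little" → ' ' ∉ result.toList
instance (result : String) (endian : String) : Decidable (Pre_styleForm result endian) := by unfold Pre_styleForm; infer_instance
def pvWitness_styleForm : String × String := ("ab1", "little")

def Spec_styleForm (result : String) (endian : String) (out : String) : Prop := out = styleForm_alt result endian
instance (result : String) (endian : String) (out : String) : Decidable (Spec_styleForm result endian out) := by unfold Spec_styleForm; infer_instance

-- ===== CLAIM (what is proved, stated in full; the proofs are below) =====
def Claim_equal_styleForm : Prop := ∀ (result : String) (endian : String), Dom_styleForm result endian → Pre_styleForm result endian → Spec_styleForm result endian (styleForm result endian)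

-- ===== LEMMAS AND PROOFS =====

-- Reference spec: chunking into pairs; tokens of a string (split at ' ', all
-- pieces kept, so the list is never empty); drop a final empty token.
def pvChunk2 : List Char → List (List Char)
  | [] => []
  | [a] => [[a]]
  | a :: b :: r => [a, b] :: pvChunk2 r

def pvT : List Char → List (List Char)
  | [] => [[]]
  | c :: cs =>
    if c = ' ' then [] :: pvT cs
    else match pvT cs with
      | [] => [[c]]
      | h :: t => (c :: h) :: t

def pvDFE (ts : List (List Char)) : List (List Char) :=
  if ts.getLast? = some [] then ts.dropLast else ts

theorem pvT_ne_nil (cs : List Char) : pvT cs ≠ [] := by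
  cases cs with
  | nil => simp [pvT]
  | cons c cs =>
    simp only [pvT]
    split
    · simp
    · split <;> simp_all

theorem pvJoin_snoc (xs : List Char) (d : Char) :
    PySem.Chars.join [' '] (pvChunk2 (xs ++ [d])) =
      if xs = [] then [d]
      else PySem.Chars.join [' '] (pvChunk2 xs) ++ (if xs.length % 2 = 1 then [d] else [' ', d]) := by
  induction xs using pvChunk2.induct with
  | case1 => simp [pvChunk2, PySem.Chars.join_singleton]
  | case2 a => simp [pvChunk2, PySem.Chars.join_singleton]
  | case3 a b r ih =>
    rcases r with _ | ⟨x, r'⟩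
    · simp [pvChunk2, PySem.Chars.join_singleton, PySem.Chars.join_cons_cons]
    · have h2 : pvChunk2 (x :: (r' ++ [d])) ≠ [] := by
        rcases r' with _ | ⟨y, r''⟩ <;> simp [pvChunk2]
      have h3 : pvChunk2 (x :: r') ≠ [] := by
        rcases r' with _ | ⟨y, r''⟩ <;> simp [pvChunk2]
      simp only [List.cons_append, pvChunk2]
      rcases hc : pvChunk2 (x :: (r' ++ [d])) with _ | ⟨p, ps⟩
      · exact absurd hc h2
      rcases hc' : pvChunk2 (x :: r') with _ | ⟨q, qs⟩
      · exact absurd hc' h3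
      have ih' := ih
      simp only [List.cons_append] at ih'
      rw [hc, hc'] at ih'
      rw [if_neg (show ¬(x :: r' = []) by simp)] at ih'
      rw [PySem.Chars.join_cons_cons, PySem.Chars.join_cons_cons, ih']
      rw [if_neg (show ¬(a :: b :: x :: r' = []) by simp)]
      have hpar : ((x :: r').length % 2 = 1) ↔ ((a :: b :: x :: r').length % 2 = 1) := by
        simp only [List.length_cons]; omega
      by_cases hp : (x :: r').length % 2 = 1
      · rw [if_pos hp, if_pos (hpar.mp hp)]; simp
      · rw [if_neg hp, if_neg (fun hcon => hp (hpar.mpr hcon))]; simp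

-- A's space() equals ' '.join of the pairs
theorem pvSpaceA_eq_join (cs : List Char) :
    pvSpaceA cs = PySem.Chars.join [' '] (pvChunk2 cs) := by
  suffices h : ∀ n, n ≤ cs.length →
      (PySem.List.pyRange 0 (n : Int) 1).foldl
        (fun res x =>
          if PySem.Int.mod x 2 ≠ 0 ∨ x = 0 then res ++ [PySem.List.pyGetD cs x ' ']
          else if PySem.Int.mod x 2 = 0 then res ++ [' ', PySem.List.pyGetD cs x ' ']
          else res) []
        = PySem.Chars.join [' '] (pvChunk2 (cs.take n)) by
    have := h cs.length le_rfl
    simpa [pvSpaceA] using this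
  intro n
  induction n with
  | zero =>
    intro _
    rw [Nat.cast_zero, PySem.List.pyRange_one_eq_nil le_rfl]
    simp [pvChunk2, PySem.Chars.join_nil]
  | succ m ih =>
    intro hn
    have hm : m ≤ cs.length := Nat.le_of_succ_le hn
    have hlt : m < cs.length := hn
    have hcast : ((m + 1 : Nat) : Int) = (m : Int) + 1 := by push_cast; ring
    rw [hcast, PySem.List.pyRange_one_succ_right (by positivity), List.foldl_append, ih hm]
    have hget : PySem.List.pyGetD cs (m : Int) ' ' = cs.getD m ' ' :=
      PySem.List.pyGetD_natCast cs m ' '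
    have htake : cs.take (m + 1) = cs.take m ++ [cs.getD m ' '] := by
      rw [List.take_succ]
      congr 1
      simp [List.getElem?_eq_getElem hlt, List.getD_eq_getElem?_getD]
    have hmod : PySem.Int.mod (m : Int) 2 = ((m % 2 : Nat) : Int) := by
      show Int.fmod (m : Int) 2 = _
      rw [Int.fmod_eq_emod]
      have : ((m % 2 : Nat) : Int) = (m : Int) % 2 := by push_cast; rfl
      rw [this]
      simp
    rw [htake, pvJoin_snoc]
    have hlen : (cs.take m).length = m := List.length_take_of_le hm
    simp only [List.foldl_cons, List.foldl_nil, hget, hmod, hlen]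
    by_cases hm0 : m = 0
    · subst hm0; simp [pvChunk2, PySem.Chars.join_nil]
    · have hne : cs.take m ≠ [] := by
        intro h; apply hm0
        have := congrArg List.length h; simpa [hlen] using this
      rw [if_neg hne]
      by_cases hpar : m % 2 = 1
      · simp [hpar]
      · have h1 : ((m % 2 : Nat) : Int) = 0 := by omega
        simp [hpar, h1, hm0]

-- B's pair comprehension equals the same chunking
theorem pvRange_step2 (n : Nat) :
    PySem.List.pyRange 0 (n : Int) 2 =
      (List.range ((n + 1) / 2)).map (fun k => ((2 * k : Nat) : Int)) := by
  rw [PySem.List.pyRange_of_pos 0 (n : Int) (by norm_num)]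
  have harg : (if (0 : Int) < (n : Int) then (((n : Int) - 0 + 2 - 1) / 2).toNat else 0) = (n + 1) / 2 := by
    split <;> omega
  rw [harg]
  apply List.map_congr_left
  intro k _
  omega

theorem pvChunk2_eq_map (cs : List Char) :
    (List.range ((cs.length + 1) / 2)).map (fun k => (cs.drop (2 * k)).take 2) = pvChunk2 cs := by
  induction cs using pvChunk2.induct with
  | case1 => simp [pvChunk2]
  | case2 a => simp [pvChunk2]
  | case3 a b r ih =>
    have hlen : ((a :: b :: r).length + 1) / 2 = (r.length + 1) / 2 + 1 := by
      simp only [List.length_cons]; omega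
    rw [hlen, List.range_succ_eq_map, List.map_cons, List.map_map]
    simp only [pvChunk2]
    refine congrArg₂ List.cons rfl ?_
    rw [← ih]
    apply List.map_congr_left
    intro k _
    simp only [Function.comp_apply]
    have h2 : 2 * (k + 1) = 2 * k + 2 := by ring
    rw [h2]
    rfl

theorem pvPairsB_eq (cs : List Char) : pvPairsB cs = pvChunk2 cs := by
  unfold pvPairsB
  rw [pvRange_step2, List.map_map, ← pvChunk2_eq_map]
  apply List.map_congr_left
  intro k _
  simp only [Function.comp_apply]
  have h2 : ((2 * k : Nat) : Int) + 2 = ((2 * k : Nat) : Int) + ((2 : Nat) : Int) := by norm_num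
  rw [h2, PySem.List.slice_natCast_add]

-- every chunk is nonempty and its characters come from cs
theorem pvChunk2_mem (cs : List Char) :
    ∀ p ∈ pvChunk2 cs, p ≠ [] ∧ ∀ c ∈ p, c ∈ cs := by
  induction cs using pvChunk2.induct with
  | case1 => simp [pvChunk2]
  | case2 a => simp [pvChunk2]
  | case3 a b r ih =>
    intro p hp
    simp only [pvChunk2, List.mem_cons] at hp
    rcases hp with rfl | hp
    · refine ⟨by simp, ?_⟩; intro c hc; simp at hc; rcases hc with rfl | rfl <;> simp
    · rcases ih p hp with ⟨h1, h2⟩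
      exact ⟨h1, fun c hc => by simp [h2 c hc]⟩

-- A's tokenizer loop computes pvDFE ∘ pvT
def pvConsApp (tmp : List Char) : List (List Char) → List (List Char)
  | [] => [tmp]
  | h :: t => (tmp ++ h) :: t

theorem pv_getLast?_cons {α : Type} (x : α) (l : List α) (h : l ≠ []) :
    (x :: l).getLast? = l.getLast? := by
  cases l with
  | nil => exact absurd rfl h
  | cons y ys => exact List.getLast?_cons_cons

theorem pv_dropLast_cons {α : Type} (x : α) (l : List α) (h : l ≠ []) :
    (x :: l).dropLast = x :: l.dropLast := by
  cases l with
  | nil => exact absurd rfl h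
  | cons y ys => rfl

theorem pvDFE_cons (x : List Char) (ts : List (List Char)) (h : ts ≠ []) :
    pvDFE (x :: ts) = x :: pvDFE ts := by
  unfold pvDFE
  rw [pv_getLast?_cons x ts h, pv_dropLast_cons x ts h]
  split <;> rfl

theorem pvTokenizeA (ns : List Char) : ∀ (arr : List (List Char)) (tmp : List Char),
    (if (ns.foldl
        (fun (st : List (List Char) × List Char) a =>
          if a = ' ' then (st.1 ++ [st.2], []) else (st.1, st.2 ++ [a])) (arr, tmp)).2 ≠ [] then
       (ns.foldl
        (fun (st : List (List Char) × List Char) a =>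
          if a = ' ' then (st.1 ++ [st.2], []) else (st.1, st.2 ++ [a])) (arr, tmp)).1 ++
         [(ns.foldl
        (fun (st : List (List Char) × List Char) a =>
          if a = ' ' then (st.1 ++ [st.2], []) else (st.1, st.2 ++ [a])) (arr, tmp)).2]
     else (ns.foldl
        (fun (st : List (List Char) × List Char) a =>
          if a = ' ' then (st.1 ++ [st.2], []) else (st.1, st.2 ++ [a])) (arr, tmp)).1)
      = arr ++ pvDFE (pvConsApp tmp (pvT ns)) := by
  induction ns with
  | nil =>
    intro arr tmp
    simp only [List.foldl_nil, pvT, pvConsApp, pvDFE]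
    by_cases h : tmp = []
    · subst h; simp
    · simp [h]
  | cons c cs ih =>
    intro arr tmp
    by_cases hc : c = ' '
    · subst hc
      simp only [List.foldl_cons, reduceIte]
      rw [ih]
      rw [show pvT (' ' :: cs) = [] :: pvT cs from by simp [pvT]]
      rcases hT : pvT cs with _ | ⟨h, t⟩
      · exact absurd hT (pvT_ne_nil cs)
      simp only [pvConsApp, List.append_nil, List.nil_append]
      rw [pvDFE_cons tmp (h :: t) (by simp)]
      simp
    · simp only [List.foldl_cons]
      rw [if_neg hc, ih]
      simp only [pvT, if_neg hc]
      rcases hT : pvT cs with _ | ⟨h, t⟩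
      · exact absurd hT (pvT_ne_nil cs)
      simp [pvConsApp]

-- prepending a space-free segment extends the first token
theorem pvT_append (t : List Char) (ht : ' ' ∉ t) (cs : List Char) :
    pvT (t ++ cs) = pvConsApp t (pvT cs) := by
  induction t with
  | nil =>
    rcases hT : pvT cs with _ | ⟨h, l⟩
    · exact absurd hT (pvT_ne_nil cs)
    · simp [pvConsApp, hT]
  | cons c t ih =>
    have hc : c ≠ ' ' := by intro h; exact ht (by simp [h])
    have ht' : ' ' ∉ t := fun h => ht (by simp [h])
    simp only [List.cons_append, pvT, if_neg hc, ih ht']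
    rcases hT : pvT cs with _ | ⟨h, l⟩
    · exact absurd hT (pvT_ne_nil cs)
    · simp [pvConsApp]

-- tokenizing the join of nonempty space-free tokens gives them back
theorem pvT_join (ps : List (List Char)) (hps : ∀ p ∈ ps, p ≠ [] ∧ ' ' ∉ p) :
    pvT (PySem.Chars.join [' '] ps) = if ps = [] then [[]] else ps := by
  induction ps with
  | nil => simp [PySem.Chars.join_nil, pvT]
  | cons p ps ih =>
    rcases ps with _ | ⟨q, ps'⟩
    · rw [PySem.Chars.join_singleton, if_neg (by simp)]
      have : pvT (p ++ []) = pvConsApp p (pvT []) := pvT_append p (hps p (by simp)).2 []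
      simpa [pvT, pvConsApp] using this
    · rw [PySem.Chars.join_cons_cons, if_neg (by simp)]
      rw [show p ++ [' '] ++ PySem.Chars.join [' '] (q :: ps') = p ++ (' ' :: PySem.Chars.join [' '] (q :: ps')) by simp]
      rw [pvT_append p (hps p (by simp)).2]
      have ih' := ih (fun r hr => hps r (by simp [hr]))
      rw [show pvT (' ' :: PySem.Chars.join [' '] (q :: ps')) = [] :: pvT (PySem.Chars.join [' '] (q :: ps')) from by simp [pvT]]
      rw [ih', if_neg (by simp)]
      simp [pvConsApp]

theorem pvDFE_no_last_empty (ts : List (List Char)) (h : ∀ p ∈ ts, p ≠ []) :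
    pvDFE ts = ts := by
  unfold pvDFE
  rcases hL : ts.getLast? with _ | t
  · simp
  · have := h t (List.mem_of_getLast? hL)
    rcases ht : t with _ | _
    · exact absurd rfl (ht ▸ this)
    · simp

-- A's merge loop is a reversed flatten
theorem pvMergeA (l : List (List Char)) : ∀ (acc : List Char),
    l.foldl (fun res x => x ++ ' ' :: res) acc
      = (l.reverse.map (fun t => t ++ [' '])).flatten ++ acc := by
  induction l with
  | nil => intro acc; simp
  | cons x l ih =>
    intro acc
    simp only [List.foldl_cons, List.reverse_cons, List.map_append, List.flatten_append]
    rw [ih]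
    simp

-- ===== VERDICT (by name: the statement is the Claim_ definition above) =====
theorem styleForm_spec : Claim_equal_styleForm := by
  intro result endian _ hpre
  show styleForm result endian = styleForm_alt result endian
  unfold styleForm styleForm_alt
  dsimp only
  rw [show pvSpaceA result.toList = PySem.Chars.join [' '] (pvPairsB result.toList) from by
    rw [pvSpaceA_eq_join, pvPairsB_eq]]
  by_cases hlittle : endian = "little"
  · have hps : ∀ p ∈ pvPairsB result.toList, p ≠ [] ∧ ' ' ∉ p := by
      intro p hp
      rw [pvPairsB_eq] at hp
      rcases pvChunk2_mem result.toList p hp with ⟨h1, h2⟩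
      exact ⟨h1, fun hc => hpre hlittle (h2 ' ' hc)⟩
    subst hlittle
    rw [if_pos rfl,
        if_neg (show ¬("little" : String) = "big" by decide),
        if_pos rfl]
    congr 1
    rw [pvTokenizeA]
    rcases hT : pvT (PySem.Chars.join [' '] (pvPairsB result.toList)) with _ | ⟨h, t⟩
    · exact absurd hT (pvT_ne_nil _)
    rw [show pvConsApp [] (h :: t) = h :: t from by simp [pvConsApp], ← hT]
    rw [pvT_join _ hps]
    by_cases hnil : pvPairsB result.toList = []
    · rw [if_pos hnil, hnil]
      simp [pvDFE]
    · rw [if_neg hnil, pvDFE_no_last_empty _ (fun p hp => (hps p hp).1)]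
      rw [List.nil_append, pvMergeA, List.append_nil]
  · by_cases hbig : endian = "big"
    · subst hbig
      rw [if_neg hlittle, if_pos rfl, if_pos rfl]
    · rw [if_neg hlittle, if_neg hbig, if_neg hbig, if_neg hlittle]
      rfl
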